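-- pv_equiv track=rewrite | github.com/javilol5/ejercicios-programacion-castelao | boletines/Boletin 7/Boletin7_13.py | insertar_entre_caracter
-- ===== SOURCE A (Python) =====
-- def insertar_entre_caracter(texto, caracter, max_accions):
--     sol = ""
--     cont = 0
--     for i in range(len(texto)):
--         sol += texto[i]
--         if i < len(texto) - 1:
--             if cont < max_accions:
--                 sol += caracter
--                 cont += 1
--             else:
--                 sol += ""
--     return sol
-- ===== SOURCE B (Python) =====
-- def insertar_entre_caracter(texto, caracter, max_accions):
--     k = min(max_accions, len(texto) - 1)
--     if k < 0:
--         k = 0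
--     return caracter.join(texto[:k + 1]) + texto[k + 1:]
-- ===== Notes on version B (the rewrite author's own statement) =====
-- stated objective: simpler
-- what changed: Replaced A's per-character loop with its running insertion counter and branch by a closed-form insertion count k = clamp(min(max_accions, len-1), 0) followed by one slice+join plus the untouched tail.
import Mathlib
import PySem

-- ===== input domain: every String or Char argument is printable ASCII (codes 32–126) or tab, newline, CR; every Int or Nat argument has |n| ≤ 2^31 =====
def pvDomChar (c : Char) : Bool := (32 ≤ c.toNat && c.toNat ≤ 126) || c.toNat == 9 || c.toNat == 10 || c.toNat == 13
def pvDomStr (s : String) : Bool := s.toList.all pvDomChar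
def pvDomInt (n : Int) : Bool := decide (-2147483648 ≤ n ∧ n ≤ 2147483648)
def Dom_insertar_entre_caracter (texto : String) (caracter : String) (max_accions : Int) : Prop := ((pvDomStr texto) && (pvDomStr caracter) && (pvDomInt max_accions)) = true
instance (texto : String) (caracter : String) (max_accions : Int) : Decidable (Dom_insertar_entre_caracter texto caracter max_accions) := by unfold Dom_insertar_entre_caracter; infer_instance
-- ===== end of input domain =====

-- B replaces A's per-character loop with its running counter by a closed-form
-- insertion count k followed by one slice+join plus the untouched tail (simpler).


-- ===== PORT A =====
-- literal port of A's loop: sol accumulates texto[i], cont counts insertions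
def insertar_entre_caracter (texto : String) (caracter : String) (max_accions : Int) : String :=
  let cs := texto.toList
  let res := (PySem.List.pyRange 0 (PySem.List.len cs) 1).foldl
    (fun (p : List Char × Int) i =>
      let sol := p.1 ++ [PySem.List.pyGetD cs i ' ']
      if i < PySem.List.len cs - 1 then
        if p.2 < max_accions then (sol ++ caracter.toList, p.2 + 1)
        else (sol, p.2)
      else (sol, p.2))
    ([], 0)
  String.mk res.1

-- ===== PORT B =====
-- literal port of B: k = clamp(min(max_accions, len-1), 0); join over first k+1 chars, plain tail
def insertar_entre_caracter_alt (texto : String) (caracter : String) (max_accions : Int) : String :=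
  let cs := texto.toList
  let k := min max_accions (PySem.List.len cs - 1)
  let k := if k < 0 then 0 else k
  String.mk (PySem.Chars.join caracter.toList
      ((PySem.List.slice cs none (some (k + 1))).map (fun c => [c]))
    ++ PySem.List.slice cs (some (k + 1)) none)

-- ===== PRECONDITION & SPEC =====
def Spec_insertar_entre_caracter (texto : String) (caracter : String) (max_accions : Int) (out : String) : Prop := out = insertar_entre_caracter_alt texto caracter max_accions
instance (texto : String) (caracter : String) (max_accions : Int) (out : String) : Decidable (Spec_insertar_entre_caracter texto caracter max_accions out) := by unfold Spec_insertar_entre_caracter; infer_instance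

-- ===== CLAIM (what is proved, stated in full; the proofs are below) =====
def Claim_equal_insertar_entre_caracter : Prop := ∀ (texto : String) (caracter : String) (max_accions : Int), Dom_insertar_entre_caracter texto caracter max_accions → Spec_insertar_entre_caracter texto caracter max_accions (insertar_entre_caracter texto caracter max_accions)

-- ===== LEMMAS AND PROOFS =====

-- A's loop as structural recursion: insert sep after each char while cont < m, never after the last
def pvBuild (sep : List Char) (m : Int) : List Char → Int → List Char
  | [], _ => []
  | [c], _ => [c]
  | c :: d :: t, cont =>
      if cont < m then c :: (sep ++ pvBuild sep m (d :: t) (cont + 1))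
      else c :: pvBuild sep m (d :: t) cont

lemma pvBuild_of_le (sep : List Char) (m : Int) (cs : List Char) (cont : Int)
    (h : m ≤ cont) : pvBuild sep m cs cont = cs := by
  induction cs generalizing cont with
  | nil => rfl
  | cons c t ih =>
    cases t with
    | nil => rfl
    | cons d t' =>
      simp only [pvBuild, if_neg (by omega : ¬ cont < m)]
      rw [ih _ h]

-- the number of singleton chunks B joins, as a function of cont
def pvJ (m : Int) (cs : List Char) (cont : Int) : Nat :=
  (max 0 (min (m - cont) ((cs.length : Int) - 1))).toNat + 1

lemma pvBuild_eq_join (sep : List Char) (m : Int) (cs : List Char) (cont : Int) :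
    pvBuild sep m cs cont =
      PySem.Chars.join sep ((cs.take (pvJ m cs cont)).map (fun c => [c]))
        ++ cs.drop (pvJ m cs cont) := by
  induction cs generalizing cont with
  | nil => simp [pvBuild, pvJ, PySem.Chars.join_nil]
  | cons c t ih =>
    cases t with
    | nil =>
      have h1 : pvJ m [c] cont = 1 := by
        simp [pvJ]
      simp [pvBuild, h1]
    | cons d t' =>
      by_cases hc : cont < m
      · have hj : pvJ m (c :: d :: t') cont = pvJ m (d :: t') (cont + 1) + 1 := by
          simp only [pvJ, List.length_cons]
          push_cast
          omega
        have hpos : 1 ≤ pvJ m (d :: t') (cont + 1) := by simp [pvJ]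
        simp only [pvBuild, if_pos hc, ih (cont + 1), hj]
        rw [List.take_succ_cons, List.drop_succ_cons, List.map_cons]
        -- join sep ([c] :: l) = [c] ++ sep ++ join sep l when l ≠ []
        obtain ⟨x, l, hx⟩ : ∃ x l, ((d :: t').take (pvJ m (d :: t') (cont + 1))).map (fun c => [c]) = x :: l := by
          rcases (List.exists_cons_of_ne_nil (by
            intro hnil
            have := congrArg List.length hnil
            simp [List.length_take] at this
            omega : ((d :: t').take (pvJ m (d :: t') (cont + 1))) ≠ [])) with ⟨x, l, hxl⟩
          exact ⟨[x], l.map (fun c => [c]), by simp [hxl]⟩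
        rw [hx, PySem.Chars.join_cons_cons]
        simp
      · have hj : pvJ m (c :: d :: t') cont = 1 := by
          simp only [pvJ, List.length_cons]; omega
        simp only [pvBuild, if_neg hc, pvBuild_of_le sep m _ cont (by omega), hj]
        simp

-- A's foldl over range(a, len cs) equals sol ++ pvBuild on the dropped suffix
lemma pvLoopA (sep : List Char) (m : Int) (cs : List Char) :
    ∀ (a : Nat) (sol : List Char) (cont : Int), a ≤ cs.length →
      ((PySem.List.pyRange (a : Int) (PySem.List.len cs) 1).foldl
        (fun (p : List Char × Int) i =>
          let sol := p.1 ++ [PySem.List.pyGetD cs i ' ']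
          if i < PySem.List.len cs - 1 then
            if p.2 < m then (sol ++ sep, p.2 + 1)
            else (sol, p.2)
          else (sol, p.2))
        (sol, cont)).1 = sol ++ pvBuild sep m (cs.drop a) cont := by
  have hlen : PySem.List.len cs = (cs.length : Int) := by simp [PySem.List.len]
  intro a
  induction hn : cs.length - a generalizing a with
  | zero =>
    intro sol cont ha
    have haa : a = cs.length := by omega
    rw [PySem.List.pyRange_one_eq_nil (by rw [hlen]; exact_mod_cast le_of_eq haa.symm)]
    simp [haa, List.drop_length, pvBuild]
  | succ n ih =>
    intro sol cont ha
    have halt : a < cs.length := by omega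
    rw [PySem.List.pyRange_one_cons (by rw [hlen]; exact_mod_cast halt)]
    rw [List.foldl_cons]
    have hget : PySem.List.pyGetD cs (a : Int) ' ' = cs[a] := by
      rw [PySem.List.pyGetD_natCast]
      simp [halt]
    have hdrop : cs.drop a = cs[a] :: cs.drop (a + 1) := List.drop_eq_getElem_cons halt
    by_cases hlast : a < cs.length - 1
    · have hcond : ((a : Int) < PySem.List.len cs - 1) := by rw [hlen]; omega
      have hdrop2 : cs.drop (a + 1) = cs[a+1] :: cs.drop (a + 2) := List.drop_eq_getElem_cons (by omega)
      by_cases hcnt : cont < m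
      · simp only [hget, if_pos hcond, if_pos hcnt]
        have := ih (a + 1) (by omega) (sol ++ [cs[a]] ++ sep) (cont + 1) (by omega)
        rw [show ((a : Int) + 1) = ((a + 1 : Nat) : Int) by push_cast; ring, this]
        rw [hdrop, hdrop2, pvBuild, if_pos hcnt]
        simp
      · simp only [hget, if_pos hcond, if_neg hcnt]
        have := ih (a + 1) (by omega) (sol ++ [cs[a]]) cont (by omega)
        rw [show ((a : Int) + 1) = ((a + 1 : Nat) : Int) by push_cast; ring, this]
        rw [hdrop, hdrop2, pvBuild, if_neg hcnt]
        simp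
    · have hcond : ¬ ((a : Int) < PySem.List.len cs - 1) := by rw [hlen]; omega
      have haa : a + 1 = cs.length := by omega
      simp only [hget, if_neg hcond]
      have := ih (a + 1) (by omega) (sol ++ [cs[a]]) cont (by omega)
      rw [show ((a : Int) + 1) = ((a + 1 : Nat) : Int) by push_cast; ring, this]
      rw [hdrop, haa, List.drop_length, pvBuild]
      simp [pvBuild]

-- ===== VERDICT (by name: the statement is the Claim_ definition above) =====
theorem insertar_entre_caracter_spec : Claim_equal_insertar_entre_caracter := by
  intro texto caracter m _
  simp only [Spec_insertar_entre_caracter, insertar_entre_caracter, insertar_entre_caracter_alt]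
  set cs := texto.toList with hcs
  have hlen : PySem.List.len cs = (cs.length : Int) := by simp [PySem.List.len]
  have hloop := pvLoopA caracter.toList m cs 0 [] 0 (Nat.zero_le _)
  simp only [Nat.cast_zero] at hloop
  rw [hloop, List.drop_zero, pvBuild_eq_join]
  -- identify B's k with pvJ
  set kk : Int := min m ((cs.length : Int) - 1) with hkk
  set k : Int := if kk < 0 then 0 else kk with hk
  have hk0 : 0 ≤ k := by rw [hk]; split <;> omega
  have hkj : (k + 1).toNat = pvJ m cs 0 := by
    simp only [pvJ, hk, hkk]
    split <;> omega
  congr 1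
  rw [hlen, ← hkk, ← hk,
    PySem.List.slice_to cs (b := k + 1) (by omega),
    PySem.List.slice_from cs (a := k + 1) (by omega), hkj, List.nil_append]
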